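-- pv_equiv track=rewrite | github.com/khush-01/Python-codes | Codechef/BRACKETS.py | brac
-- ===== SOURCE A (Python) =====
-- def brac(s):
-- 	mxm = 0
-- 	bal = 0
-- 	for x in s:
-- 		if x == '(':
-- 			bal += 1
-- 		else:
-- 			bal -= 1
-- 		mxm = max(mxm, bal)
-- 	return mxm
-- ===== SOURCE B (Python) =====
-- def brac(s):
--     def go(t):
--         # returns (max prefix balance floored at 0, total balance) of t
--         if len(t) == 0:
--             return (0, 0)
--         if len(t) == 1:
--             d = 1 if t == '(' else -1
--             return (max(0, d), d)
--         mid = len(t) // 2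
--         m1, t1 = go(t[:mid])
--         m2, t2 = go(t[mid:])
--         return (max(m1, t1 + m2), t1 + t2)
--     return go(s)[0]
-- ===== Notes on version B (the rewrite author's own statement) =====
-- stated objective: alternative
-- what changed: Replaced the scalar running-max loop with a divide-and-conquer recursion that combines (max-prefix-balance, total-balance) pairs of the two string halves.
import Mathlib
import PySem

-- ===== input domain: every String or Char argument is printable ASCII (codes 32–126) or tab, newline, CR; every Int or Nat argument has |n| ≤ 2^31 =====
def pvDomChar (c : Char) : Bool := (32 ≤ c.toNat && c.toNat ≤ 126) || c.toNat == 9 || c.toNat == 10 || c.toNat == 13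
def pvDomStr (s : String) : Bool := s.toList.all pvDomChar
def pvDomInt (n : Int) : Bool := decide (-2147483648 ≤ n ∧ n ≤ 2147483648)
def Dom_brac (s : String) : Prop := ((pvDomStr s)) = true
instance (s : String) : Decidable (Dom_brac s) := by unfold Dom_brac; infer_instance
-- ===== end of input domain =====

-- B replaces A's scalar running-max loop by a divide-and-conquer recursion on string halves (alternative decomposition; no speed claim).

-- ===== PORT A =====
-- step of A's for-loop: state (mxm, bal)
def bracStep (st : Int × Int) (x : Char) : Int × Int :=
  let bal := if x = '(' then st.2 + 1 else st.2 - 1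
  (max st.1 bal, bal)

def brac (s : String) : Int :=
  (s.toList.foldl bracStep (0, 0)).1

-- ===== PORT B =====
-- go t = (max prefix balance floored at 0, total balance) of t
def bracGo (t : List Char) : Int × Int :=
  if t.length = 0 then (0, 0)
  else if t.length = 1 then
    let d : Int := if t = ['('] then 1 else -1
    (max 0 d, d)
  else
    let mid := t.length / 2
    let p1 := bracGo (t.take mid)
    let p2 := bracGo (t.drop mid)
    (max p1.1 (p1.2 + p2.1), p1.2 + p2.2)
termination_by t.length
decreasing_by
  · simp [List.length_take]; omega
  · simp [List.length_drop]; omega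

def brac_alt (s : String) : Int :=
  (bracGo s.toList).1

-- ===== PRECONDITION & SPEC =====
def Spec_brac (s : String) (out : Int) : Prop := out = brac_alt s
instance (s : String) (out : Int) : Decidable (Spec_brac s out) := by unfold Spec_brac; infer_instance

-- ===== CLAIM (what is proved, stated in full; the proofs are below) =====
def Claim_equal_brac : Prop := ∀ (s : String), Dom_brac s → Spec_brac s (brac s)

-- ===== LEMMAS AND PROOFS =====

-- loop invariant of A: bal ≤ mxm when started from (0,0)
theorem bracFold_bal_le_mxm (l : List Char) :
    (l.foldl bracStep (0, 0)).2 ≤ (l.foldl bracStep (0, 0)).1 := by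
  suffices h : ∀ (m b : Int), b ≤ m → (l.foldl bracStep (m, b)).2 ≤ (l.foldl bracStep (m, b)).1 from
    h 0 0 le_rfl
  induction l with
  | nil => intro m b h; simpa using h
  | cons c l ih =>
    intro m b h
    simp only [List.foldl_cons, bracStep]
    exact ih _ _ (le_max_right _ _)

-- A's fold from an arbitrary state (with the loop invariant bal ≤ mxm), via the fold from (0,0)
theorem bracFold_shift (l : List Char) (m b : Int) (hbm : b ≤ m) :
    l.foldl bracStep (m, b) =
      (max m (b + (l.foldl bracStep (0, 0)).1), b + (l.foldl bracStep (0, 0)).2) := by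
  induction l generalizing m b with
  | nil => simp; omega
  | cons c l ih =>
    simp only [List.foldl_cons]
    have h1 : bracStep (m, b) c = (max m (if c = '(' then b+1 else b-1), if c = '(' then b+1 else b-1) := by
      simp [bracStep]
    have h2 : bracStep (0, 0) c = (max 0 (if c = '(' then (1:Int) else -1), if c = '(' then (1:Int) else -1) := by
      simp [bracStep]
    rw [h1, h2, ih _ _ (le_max_right _ _), ih _ _ (le_max_right _ _)]
    refine Prod.ext ?_ (by dsimp; split_ifs <;> ring)
    dsimp
    split_ifs <;> (simp only [max_def]; split_ifs <;> omega)

theorem bracGo_eq (t : List Char) : bracGo t = t.foldl bracStep (0, 0) := by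
  induction t using bracGo.induct with
  | case1 t h0 =>
    rw [bracGo]; simp [List.length_eq_zero_iff.mp h0]
  | case2 t h0 h1 =>
    obtain ⟨c, hc⟩ := List.length_eq_one_iff.mp h1
    rw [bracGo]; subst hc
    simp [bracStep, List.cons.injEq]
  | case3 t h0 h1 mid ih1 ih2 =>
    rw [bracGo]
    simp only [h0, h1, if_false]
    rw [ih1, ih2]
    conv_rhs => rw [← List.take_append_drop (t.length / 2) t]
    rw [List.foldl_append, bracFold_shift _ _ _ (bracFold_bal_le_mxm _)]

-- ===== VERDICT (by name: the statement is the Claim_ definition above) =====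
theorem brac_spec : Claim_equal_brac := by
  intro s _
  unfold Spec_brac brac brac_alt
  rw [bracGo_eq]
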